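-- pv_equiv track=rewrite | github.com/Sotelo-Nazareno/Python_Progra_1 | clase-11/functions.py | obtener_heroes_por_tipo
-- ===== SOURCE A (Python) =====
-- def normalizar_dato(valor:str, valor_defecto:str)-> str:
--     """
--     Normaliza el dato
--
--     Args:
--         valor (str): El valor de un dato de un heroe
--         valor_defecto (str): El valor a reemplazar si el parametro anterior es vacio
--
--     Returns:
--         str: Devuelve el valor de un heroe
--     """
--     if valor in ('-', '', None):
--         return valor_defecto
--     else:
--         return valor
--
-- def obtener_heroes_por_tipo(lista_heroes:list[dict], lista_var: list, key: str)->dict: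
--     """
--     Obtiene los heroes por tipo de la key seleccionada
--
--     Args:
--         lista_heroes (list[dict]): La lista de heroes
--         lista_var (list): La lista de variedades
--         key (str): El tipo de dato de un heroe
--
--     Returns:
--         dict: Devuelve un diccionario de heroes por tipo
--     """
--
--
--     diccionario_tipo = dict()
--
--     for tipo in lista_var:
--
--         diccionario_tipo[tipo] = []
--
--         for heroe in lista_heroes:
--             tipo_heroe = normalizar_dato(heroe.get(key), "N/A")
--
--             if tipo_heroe in diccionario_tipo.keys():
--                 if heroe.get('nombre') not in diccionario_tipo[tipo_heroe]:
--                     diccionario_tipo[tipo_heroe].append(heroe.get('nombre'))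
--
--     return diccionario_tipo
-- ===== SOURCE B (Python) =====
-- def obtener_heroes_por_tipo(lista_heroes, lista_var, key):
--     grupos = {tipo: [] for tipo in lista_var}
--     vistos = {tipo: set() for tipo in lista_var}
--     for heroe in lista_heroes:
--         tipo = heroe.get(key)
--         if tipo in ('-', '', None):
--             tipo = "N/A"
--         if tipo in grupos:
--             nombre = heroe.get('nombre')
--             if nombre not in vistos[tipo]:
--                 vistos[tipo].add(nombre)
--                 grupos[tipo].append(nombre)
--     return grupos
-- ===== Notes on version B (the rewrite author's own statement) =====
-- stated objective: faster
-- what changed: Replaced the nested loop over lista_var x lista_heroes (with its self-seeding dict and linear 'name not in list' scans) by a single pass over the heroes into a pre-built dict keyed by the normalized value, with a per-key set for name dedup.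
-- outside the precondition, e.g. on obtener_heroes_por_tipo([{'tipo': 'x'}], ['x'], 'tipo'): A returns {'x': [None]}, B returns {'x': [None]}
import Mathlib
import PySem

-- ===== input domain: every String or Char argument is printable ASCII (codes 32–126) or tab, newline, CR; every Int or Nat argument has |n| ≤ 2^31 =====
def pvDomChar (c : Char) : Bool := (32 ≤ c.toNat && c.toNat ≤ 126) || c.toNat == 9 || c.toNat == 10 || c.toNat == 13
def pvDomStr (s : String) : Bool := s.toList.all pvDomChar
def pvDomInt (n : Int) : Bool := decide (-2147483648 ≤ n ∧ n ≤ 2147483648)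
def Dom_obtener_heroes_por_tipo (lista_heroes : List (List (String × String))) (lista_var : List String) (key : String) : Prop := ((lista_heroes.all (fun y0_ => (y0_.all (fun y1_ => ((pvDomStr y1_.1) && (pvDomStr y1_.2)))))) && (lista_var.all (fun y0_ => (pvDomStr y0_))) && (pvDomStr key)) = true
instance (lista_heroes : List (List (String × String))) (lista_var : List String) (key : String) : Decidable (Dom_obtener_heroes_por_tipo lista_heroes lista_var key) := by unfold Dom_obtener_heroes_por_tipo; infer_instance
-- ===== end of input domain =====

-- B replaces A's nested lista_var×lista_heroes loop (self-seeding dict, linear list scans)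
-- by one pass over lista_heroes into a pre-built dict of groups with per-key seen-sets.


-- ===== PORT A =====
def normalizar_dato (valor : Option String) (valor_defecto : String) : String :=
  -- 'valor in ('-', '', None)': none models Python's None (heroe.get(key) missing)
  match valor with
  | none => valor_defecto
  | some v => if v = "-" ∨ v = "" then valor_defecto else v

def obtener_heroes_por_tipo (lista_heroes : List (List (String × String))) (lista_var : List String) (key : String) : List (String × List String) :=
  (lista_var.foldl (fun diccionario_tipo tipo =>
      let diccionario_tipo := diccionario_tipo.insert tipo []
      lista_heroes.foldl (fun diccionario_tipo heroe =>
          let tipo_heroe := normalizar_dato ((PySem.Dict.mk heroe).get? key) "N/A"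
          if diccionario_tipo.contains tipo_heroe then
            -- heroe.get('nombre'): exact under Pre_ (such a hero carries 'nombre')
            let nombre := ((PySem.Dict.mk heroe).get? "nombre").getD ""
            if nombre ∈ diccionario_tipo.getD tipo_heroe [] then diccionario_tipo
            else diccionario_tipo.insert tipo_heroe (diccionario_tipo.getD tipo_heroe [] ++ [nombre])
          else diccionario_tipo)
        diccionario_tipo)
    (PySem.Dict.empty : PySem.Dict String (List String))).items

-- ===== PORT B =====
def obtener_heroes_por_tipo_alt (lista_heroes : List (List (String × String))) (lista_var : List String) (key : String) : List (String × List String) :=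
  let grupos : PySem.Dict String (List String) :=
    lista_var.foldl (fun d tipo => d.insert tipo []) PySem.Dict.empty
  let vistos : PySem.Dict String (PySem.Set String) :=
    lista_var.foldl (fun d tipo => d.insert tipo PySem.Set.empty) PySem.Dict.empty
  (lista_heroes.foldl (fun st heroe =>
      let tipo := match (PySem.Dict.mk heroe).get? key with
        | none => "N/A"
        | some v => if v = "-" ∨ v = "" then "N/A" else v
      if st.1.contains tipo then
        -- heroe.get('nombre'): exact under Pre_ (such a hero carries 'nombre')
        let nombre := ((PySem.Dict.mk heroe).get? "nombre").getD ""
        if PySem.Set.contains (st.2.getD tipo PySem.Set.empty) nombre then st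
        else (st.1.insert tipo (st.1.getD tipo [] ++ [nombre]),
              st.2.insert tipo (PySem.Set.add (st.2.getD tipo PySem.Set.empty) nombre))
      else st)
    (grupos, vistos)).1.items

-- ===== PRECONDITION & SPEC =====
-- Pre_ excludes heroes that lack the 'nombre' key while their normalized key-value lies in
-- lista_var: there Python appends None to a list the declared type dict[str, list[str]] says
-- holds str (not representable as List String).
def Pre_obtener_heroes_por_tipo (lista_heroes : List (List (String × String))) (lista_var : List String) (key : String) : Prop :=
  ∀ h ∈ lista_heroes, ((PySem.Dict.mk h).get? "nombre").isSome = true ∨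
    (match (PySem.Dict.mk h).get? key with
     | none => "N/A"
     | some v => if v = "-" ∨ v = "" then "N/A" else v) ∉ lista_var
instance (lista_heroes : List (List (String × String))) (lista_var : List String) (key : String) : Decidable (Pre_obtener_heroes_por_tipo lista_heroes lista_var key) := by unfold Pre_obtener_heroes_por_tipo; infer_instance

def pvWitness_obtener_heroes_por_tipo : (List (List (String × String))) × List String × String :=
  ([[("nombre", "a"), ("tipo", "x")], [("nombre", "b"), ("tipo", "-")]], ["x", "N/A"], "tipo")

def Spec_obtener_heroes_por_tipo (lista_heroes : List (List (String × String))) (lista_var : List String) (key : String) (out : List (String × List String)) : Prop := out = obtener_heroes_por_tipo_alt lista_heroes lista_var key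
instance (lista_heroes : List (List (String × String))) (lista_var : List String) (key : String) (out : List (String × List String)) : Decidable (Spec_obtener_heroes_por_tipo lista_heroes lista_var key out) := by unfold Spec_obtener_heroes_por_tipo; infer_instance

-- ===== CLAIM (what is proved, stated in full; the proofs are below) =====
def Claim_equal_obtener_heroes_por_tipo : Prop := ∀ (lista_heroes : List (List (String × String))) (lista_var : List String) (key : String), Dom_obtener_heroes_por_tipo lista_heroes lista_var key → Pre_obtener_heroes_por_tipo lista_heroes lista_var key → Spec_obtener_heroes_por_tipo lista_heroes lista_var key (obtener_heroes_por_tipo lista_heroes lista_var key)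

-- ===== LEMMAS AND PROOFS =====

-- normalized key-value of a hero (= both ports' tipo computation)
def hTipo (key : String) (h : List (String × String)) : String :=
  match (PySem.Dict.mk h).get? key with
  | none => "N/A"
  | some v => if v = "-" ∨ v = "" then "N/A" else v

def hName (h : List (String × String)) : String := ((PySem.Dict.mk h).get? "nombre").getD ""

-- one dedup-append step of the group list for tipo t
def addH (key t : String) (l : List String) (h : List (String × String)) : List String :=
  if hTipo key h = t then (if hName h ∈ l then l else l ++ [hName h]) else l

-- the group list for tipo t over a hero list
def canon (key t : String) (hs : List (List (String × String))) : List String :=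
  hs.foldl (addH key t) []

-- a dict whose items are the keys s each mapped through f
def mdict (s : List String) (f : String → List String) : PySem.Dict String (List String) :=
  PySem.Dict.mk (s.map (fun t => (t, f t)))

lemma hName_eq (h : List (String × String)) :
    ((PySem.Dict.mk h).get? "nombre").getD "" = hName h := rfl

lemma hTipo_eq (key : String) (h : List (String × String)) :
    normalizar_dato ((PySem.Dict.mk h).get? key) "N/A" = hTipo key h := rfl

lemma keys_mdict (s : List String) (f : String → List String) : (mdict s f).keys = s := by
  simp [mdict, PySem.Dict.keys, Function.comp_def]

lemma contains_mdict (s : List String) (f : String → List String) (t : String) :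
    (mdict s f).contains t = decide (t ∈ s) := by
  rw [PySem.Dict.contains_eq_decide_mem_keys, keys_mdict]

lemma getD_mdict_mem {s : List String} {t : String} (f : String → List String) (d0 : List String)
    (hs : s.Nodup) (ht : t ∈ s) : (mdict s f).getD t d0 = f t := by
  apply PySem.Dict.getD_of_mem_items
  · exact List.mem_map_of_mem ht
  · rw [keys_mdict]; exact hs

lemma mdict_congr {s : List String} {f g : String → List String}
    (h : ∀ u ∈ s, f u = g u) : mdict s f = mdict s g := by
  unfold mdict
  exact congrArg PySem.Dict.mk (List.map_congr_left (fun u hu => by rw [h u hu]))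

lemma insert_mdict_mem {s : List String} {t : String} (f : String → List String) (v : List String)
    (ht : t ∈ s) :
    (mdict s f).insert t v = mdict s (fun u => if u = t then v else f u) := by
  apply PySem.Dict.ext
  rw [PySem.Dict.items_insert_of_contains _ _ (by rw [contains_mdict]; simpa using ht)]
  show (s.map (fun u => (u, f u))).map _ = s.map _
  rw [List.map_map]
  apply List.map_congr_left
  intro u _
  by_cases h : u = t <;> simp [h]

lemma insert_mdict_not_mem {s : List String} {t : String} (f : String → List String) (v : List String)
    (ht : t ∉ s) :
    (mdict s f).insert t v = mdict (s ++ [t]) (fun u => if u = t then v else f u) := by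
  apply PySem.Dict.ext
  rw [PySem.Dict.items_insert_of_not_contains _ _ (by rw [contains_mdict]; simpa using ht)]
  show (s.map (fun u => (u, f u))) ++ [(t, v)] = (s ++ [t]).map _
  rw [List.map_append]
  congr 1
  · apply List.map_congr_left
    intro u hu
    have : u ≠ t := fun e => ht (e ▸ hu)
    simp [this]
  · simp

lemma canon_nil (key t : String) : canon key t [] = [] := rfl

lemma canon_append_singleton (key t : String) (p : List (List (String × String)))
    (h : List (String × String)) :
    canon key t (p ++ [h]) = addH key t (canon key t p) h := by
  unfold canon
  rw [List.foldl_append]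
  rfl

lemma canon_append_of_ne {key t : String} {h : List (String × String)}
    (hne : hTipo key h ≠ t) (p : List (List (String × String))) :
    canon key t (p ++ [h]) = canon key t p := by
  rw [canon_append_singleton]
  unfold addH
  simp [hne]

lemma canon_append_of_mem {key t : String} {h : List (String × String)}
    (heq : hTipo key h = t) {p : List (List (String × String))}
    (hn : hName h ∈ canon key t p) :
    canon key t (p ++ [h]) = canon key t p := by
  rw [canon_append_singleton]
  unfold addH
  rw [if_pos heq, if_pos hn]

lemma canon_append_of_not_mem {key t : String} {h : List (String × String)}
    (heq : hTipo key h = t) {p : List (List (String × String))}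
    (hn : hName h ∉ canon key t p) :
    canon key t (p ++ [h]) = canon key t p ++ [hName h] := by
  rw [canon_append_singleton]
  unfold addH
  rw [if_pos heq, if_neg hn]

lemma mem_foldl_addH {key t n : String} (hs : List (List (String × String))) (acc : List String)
    (h : n ∈ acc) : n ∈ hs.foldl (addH key t) acc := by
  induction hs generalizing acc with
  | nil => simpa using h
  | cons hd tl ih =>
      rw [List.foldl_cons]
      apply ih
      unfold addH
      split_ifs <;> simp [h]

lemma mem_canon {key t : String} {hs : List (List (String × String))}
    {h : List (String × String)} (hh : h ∈ hs) (ht : hTipo key h = t) :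
    hName h ∈ canon key t hs := by
  unfold canon
  suffices H : ∀ (l : List (List (String × String))) (acc : List String), h ∈ l →
      hName h ∈ l.foldl (addH key t) acc by exact H hs [] hh
  intro l
  induction l with
  | nil => intro acc h0; simp at h0
  | cons hd tl ih =>
      intro acc h0
      rcases List.mem_cons.mp h0 with he | htl
      · subst he
        rw [List.foldl_cons]
        apply mem_foldl_addH
        unfold addH
        rw [if_pos ht]
        split_ifs with hm
        · exact hm
        · simp
      · exact ih _ htl

-- ===== A-side =====

-- A's inner loop, started from a dict whose tipo-slot holds the groups of the hero prefix p
-- and whose other slots already hold the full groups, completes the tipo-slot.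
lemma a_inner (key tipo : String) (heroes : List (List (String × String))) :
    ∀ (rest p : List (List (String × String))) (s : List String), s.Nodup → tipo ∈ s →
      heroes = p ++ rest →
      rest.foldl (fun diccionario_tipo heroe =>
          let tipo_heroe := normalizar_dato ((PySem.Dict.mk heroe).get? key) "N/A"
          if diccionario_tipo.contains tipo_heroe then
            let nombre := ((PySem.Dict.mk heroe).get? "nombre").getD ""
            if nombre ∈ diccionario_tipo.getD tipo_heroe [] then diccionario_tipo
            else diccionario_tipo.insert tipo_heroe (diccionario_tipo.getD tipo_heroe [] ++ [nombre])
          else diccionario_tipo)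
        (mdict s (fun u => if u = tipo then canon key tipo p else canon key u heroes))
      = mdict s (fun u => if u = tipo then canon key tipo heroes else canon key u heroes) := by
  intro rest
  induction rest with
  | nil =>
      intro p s hs htipo hp
      rw [List.append_nil] at hp
      subst hp
      rfl
  | cons h rest ih =>
      intro p s hs htipo hp
      rw [List.foldl_cons]
      have hmem : h ∈ heroes := by rw [hp]; simp
      have hp' : heroes = (p ++ [h]) ++ rest := by rw [hp]; simp
      have step : (let tipo_heroe := normalizar_dato ((PySem.Dict.mk h).get? key) "N/A"
          let d := mdict s (fun u => if u = tipo then canon key tipo p else canon key u heroes)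
          if d.contains tipo_heroe then
            let nombre := ((PySem.Dict.mk h).get? "nombre").getD ""
            if nombre ∈ d.getD tipo_heroe [] then d
            else d.insert tipo_heroe (d.getD tipo_heroe [] ++ [nombre])
          else d)
          = mdict s (fun u => if u = tipo then canon key tipo (p ++ [h]) else canon key u heroes) := by
        simp only [hTipo_eq, hName_eq, contains_mdict]
        by_cases hin : hTipo key h ∈ s
        · rw [decide_eq_true hin]
          simp only [if_true]
          rw [getD_mdict_mem _ _ hs hin]
          by_cases heq : hTipo key h = tipo
          · rw [if_pos heq]
            by_cases hn : hName h ∈ canon key tipo p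
            · rw [if_pos hn]
              apply mdict_congr
              intro u _
              by_cases hu : u = tipo
              · rw [if_pos hu, if_pos hu, canon_append_of_mem heq hn]
              · rw [if_neg hu, if_neg hu]
            · rw [if_neg hn, insert_mdict_mem _ _ hin]
              apply mdict_congr
              intro u _
              rw [heq]
              by_cases hu : u = tipo
              · rw [if_pos hu, if_pos hu, canon_append_of_not_mem heq hn]
              · rw [if_neg hu, if_neg hu, if_neg hu]
          · rw [if_neg heq]
            have hnm : hName h ∈ canon key (hTipo key h) heroes := mem_canon hmem rfl
            rw [if_pos hnm]
            apply mdict_congr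
            intro u _
            by_cases hu : u = tipo
            · rw [if_pos hu, if_pos hu]
              exact (canon_append_of_ne (hu ▸ heq : hTipo key h ≠ tipo) p).symm
            · rw [if_neg hu, if_neg hu]
        · rw [decide_eq_false hin]
          simp only [Bool.false_eq_true, if_false]
          apply mdict_congr
          intro u _
          by_cases hut : u = tipo
          · rw [if_pos hut, if_pos hut]
            have hne : hTipo key h ≠ tipo := fun e => hin (e ▸ htipo)
            exact (canon_append_of_ne hne p).symm
          · rw [if_neg hut, if_neg hut]
      exact (congrArg (fun d => List.foldl _ d rest) step).trans (ih (p ++ [h]) s hs htipo hp')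

-- A's outer loop: processing the tipos of l onto a dict of already-complete slots s yields the
-- complete dict on the deduplicated keys.
lemma a_outer (key : String) (heroes : List (List (String × String))) :
    ∀ (l s : List String), s.Nodup →
      l.foldl (fun diccionario_tipo tipo =>
          let diccionario_tipo := diccionario_tipo.insert tipo []
          heroes.foldl (fun diccionario_tipo heroe =>
              let tipo_heroe := normalizar_dato ((PySem.Dict.mk heroe).get? key) "N/A"
              if diccionario_tipo.contains tipo_heroe then
                let nombre := ((PySem.Dict.mk heroe).get? "nombre").getD ""
                if nombre ∈ diccionario_tipo.getD tipo_heroe [] then diccionario_tipo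
                else diccionario_tipo.insert tipo_heroe (diccionario_tipo.getD tipo_heroe [] ++ [nombre])
              else diccionario_tipo)
            diccionario_tipo)
        (mdict s (fun u => canon key u heroes))
      = mdict (PySem.Set.update s l) (fun u => canon key u heroes) := by
  intro l
  induction l with
  | nil => intro s hs; rfl
  | cons tipo l ih =>
      intro s hs
      rw [List.foldl_cons]
      by_cases ht : tipo ∈ s
      · have h1 : (mdict s (fun u => canon key u heroes)).insert tipo []
            = mdict s (fun u => if u = tipo then canon key tipo [] else canon key u heroes) := by
          rw [insert_mdict_mem _ _ ht]
          apply mdict_congr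
          intro u _
          by_cases hu : u = tipo
          · rw [if_pos hu, if_pos hu, canon_nil]
          · rw [if_neg hu, if_neg hu]
        have h2 := a_inner key tipo heroes heroes [] s hs ht (by simp)
        have h3 : mdict s (fun u => if u = tipo then canon key tipo heroes else canon key u heroes)
            = mdict s (fun u => canon key u heroes) := by
          apply mdict_congr
          intro u _
          by_cases hu : u = tipo
          · rw [if_pos hu, hu]
          · rw [if_neg hu]
        have h4 : PySem.Set.update s (tipo :: l) = PySem.Set.update s l := by
          show PySem.Set.update (PySem.Set.add s tipo) l = _
          rw [PySem.Set.add_of_mem ht]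
        have step := (congrArg (fun d => heroes.foldl _ d) h1).trans (h2.trans h3)
        rw [h4]
        exact (congrArg (fun d => List.foldl _ d l) step).trans (ih s hs)
      · have hs' : (s ++ [tipo]).Nodup :=
          hs.append (List.nodup_singleton tipo) (by simpa [List.disjoint_singleton] using ht)
        have ht' : tipo ∈ s ++ [tipo] := by simp
        have h1 : (mdict s (fun u => canon key u heroes)).insert tipo []
            = mdict (s ++ [tipo]) (fun u => if u = tipo then canon key tipo [] else canon key u heroes) := by
          rw [insert_mdict_not_mem _ _ ht]
          apply mdict_congr
          intro u _
          by_cases hu : u = tipo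
          · rw [if_pos hu, if_pos hu, canon_nil]
          · rw [if_neg hu, if_neg hu]
        have h2 := a_inner key tipo heroes heroes [] (s ++ [tipo]) hs' ht' (by simp)
        have h3 : mdict (s ++ [tipo]) (fun u => if u = tipo then canon key tipo heroes else canon key u heroes)
            = mdict (s ++ [tipo]) (fun u => canon key u heroes) := by
          apply mdict_congr
          intro u _
          by_cases hu : u = tipo
          · rw [if_pos hu, hu]
          · rw [if_neg hu]
        have h4 : PySem.Set.update s (tipo :: l) = PySem.Set.update (s ++ [tipo]) l := by
          show PySem.Set.update (PySem.Set.add s tipo) l = _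
          rw [PySem.Set.add_of_not_mem ht]
        have step := (congrArg (fun d => heroes.foldl _ d) h1).trans (h2.trans h3)
        rw [h4]
        exact (congrArg (fun d => List.foldl _ d l) step).trans (ih (s ++ [tipo]) hs')

lemma A_eq (lista_heroes : List (List (String × String))) (lista_var : List String) (key : String) :
    obtener_heroes_por_tipo lista_heroes lista_var key
      = (mdict (PySem.Set.ofList lista_var) (fun u => canon key u lista_heroes)).items := by
  unfold obtener_heroes_por_tipo
  have h0 : (PySem.Dict.empty : PySem.Dict String (List String))
      = mdict [] (fun u => canon key u lista_heroes) := rfl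
  have hup : PySem.Set.update [] lista_var = PySem.Set.ofList lista_var := by
    rw [PySem.Set.ofList_eq_foldl]; rfl
  rw [h0, a_outer key lista_heroes lista_var [] List.nodup_nil, hup]

-- ===== B-side =====

-- building {t: c for t in lista_var}
lemma b_init (c : List String) :
    ∀ (l s : List String), s.Nodup →
      l.foldl (fun d tipo => d.insert tipo c) (mdict s (fun _ => c))
        = mdict (PySem.Set.update s l) (fun _ => c) := by
  intro l
  induction l with
  | nil => intro s hs; rfl
  | cons tipo l ih =>
      intro s hs
      rw [List.foldl_cons]
      by_cases ht : tipo ∈ s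
      · have h1 : (mdict s (fun _ => c)).insert tipo c = mdict s (fun _ => c) := by
          rw [insert_mdict_mem _ _ ht]
          apply mdict_congr
          intro u _
          split_ifs <;> rfl
        have h4 : PySem.Set.update s (tipo :: l) = PySem.Set.update s l := by
          show PySem.Set.update (PySem.Set.add s tipo) l = _
          rw [PySem.Set.add_of_mem ht]
        rw [h1, h4]
        exact ih s hs
      · have hs' : (s ++ [tipo]).Nodup :=
          hs.append (List.nodup_singleton tipo) (by simpa [List.disjoint_singleton] using ht)
        have h1 : (mdict s (fun _ => c)).insert tipo c = mdict (s ++ [tipo]) (fun _ => c) := by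
          rw [insert_mdict_not_mem _ _ ht]
          apply mdict_congr
          intro u _
          split_ifs <;> rfl
        have h4 : PySem.Set.update s (tipo :: l) = PySem.Set.update (s ++ [tipo]) l := by
          show PySem.Set.update (PySem.Set.add s tipo) l = _
          rw [PySem.Set.add_of_not_mem ht]
        rw [h1, h4]
        exact ih (s ++ [tipo]) hs'

-- B's single pass: both components track the groups of the processed hero prefix.
lemma b_main (key : String) (S : List String) (hS : S.Nodup)
    (heroes : List (List (String × String))) :
    ∀ (rest p : List (List (String × String))), heroes = p ++ rest →
      rest.foldl (fun (st : PySem.Dict String (List String) × PySem.Dict String (PySem.Set String)) heroe =>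
          let tipo := match (PySem.Dict.mk heroe).get? key with
            | none => "N/A"
            | some v => if v = "-" ∨ v = "" then "N/A" else v
          if st.1.contains tipo then
            let nombre := ((PySem.Dict.mk heroe).get? "nombre").getD ""
            if PySem.Set.contains (st.2.getD tipo PySem.Set.empty) nombre then st
            else (st.1.insert tipo (st.1.getD tipo [] ++ [nombre]),
                  st.2.insert tipo (PySem.Set.add (st.2.getD tipo PySem.Set.empty) nombre))
          else st)
        (mdict S (fun u => canon key u p), mdict S (fun u => canon key u p))
      = (mdict S (fun u => canon key u heroes), mdict S (fun u => canon key u heroes)) := by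
  intro rest
  induction rest with
  | nil =>
      intro p hp
      rw [List.append_nil] at hp
      subst hp
      rfl
  | cons h rest ih =>
      intro p hp
      rw [List.foldl_cons]
      have hmem : h ∈ heroes := by rw [hp]; simp
      have hp' : heroes = (p ++ [h]) ++ rest := by rw [hp]; simp
      have htipo_eq' : (match (PySem.Dict.mk h).get? key with
          | none => "N/A"
          | some v => if v = "-" ∨ v = "" then "N/A" else v) = hTipo key h := rfl
      have step : (let tipo := match (PySem.Dict.mk h).get? key with
            | none => "N/A"
            | some v => if v = "-" ∨ v = "" then "N/A" else v
          let st : PySem.Dict String (List String) × PySem.Dict String (PySem.Set String) :=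
            (mdict S (fun u => canon key u p), mdict S (fun u => canon key u p))
          if st.1.contains tipo then
            let nombre := ((PySem.Dict.mk h).get? "nombre").getD ""
            if PySem.Set.contains (st.2.getD tipo PySem.Set.empty) nombre then st
            else (st.1.insert tipo (st.1.getD tipo [] ++ [nombre]),
                  st.2.insert tipo (PySem.Set.add (st.2.getD tipo PySem.Set.empty) nombre))
          else st)
          = (mdict S (fun u => canon key u (p ++ [h])), mdict S (fun u => canon key u (p ++ [h]))) := by
        simp only [htipo_eq', hName_eq, contains_mdict]
        by_cases hin : hTipo key h ∈ S
        · rw [decide_eq_true hin]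
          simp only [if_true]
          rw [getD_mdict_mem _ _ hS hin, getD_mdict_mem _ _ hS hin]
          by_cases hn : hName h ∈ canon key (hTipo key h) p
          · have hc : PySem.Set.contains (canon key (hTipo key h) p) (hName h) = true := by
              simpa [pysem] using hn
            rw [if_pos hc]
            have hcanon : ∀ u ∈ S, canon key u p = canon key u (p ++ [h]) := by
              intro u _
              by_cases hu : u = hTipo key h
              · rw [hu, canon_append_of_mem rfl (hu ▸ hn)]
              · exact (canon_append_of_ne (fun e => hu e.symm) p).symm
            rw [mdict_congr hcanon]
          · have hc : ¬ PySem.Set.contains (canon key (hTipo key h) p) (hName h) = true := by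
              simpa [pysem] using hn
            rw [if_neg hc]
            rw [PySem.Set.add_of_not_mem hn]
            rw [insert_mdict_mem _ _ hin]
            have hcanon : ∀ u ∈ S,
                (if u = hTipo key h then canon key (hTipo key h) p ++ [hName h] else canon key u p)
                  = canon key u (p ++ [h]) := by
              intro u _
              by_cases hu : u = hTipo key h
              · rw [if_pos hu, hu, canon_append_of_not_mem rfl hn]
              · rw [if_neg hu]
                exact (canon_append_of_ne (fun e => hu e.symm) p).symm
            rw [mdict_congr hcanon]
        · rw [decide_eq_false hin]
          simp only [Bool.false_eq_true, if_false]
          have hcanon : ∀ u ∈ S, canon key u p = canon key u (p ++ [h]) := by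
            intro u hu
            have hne : hTipo key h ≠ u := fun e => hin (e ▸ hu)
            exact (canon_append_of_ne hne p).symm
          rw [mdict_congr hcanon]
      exact (congrArg (fun st => List.foldl _ st rest) step).trans (ih (p ++ [h]) hp')

lemma B_eq (lista_heroes : List (List (String × String))) (lista_var : List String) (key : String) :
    obtener_heroes_por_tipo_alt lista_heroes lista_var key
      = (mdict (PySem.Set.ofList lista_var) (fun u => canon key u lista_heroes)).items := by
  unfold obtener_heroes_por_tipo_alt
  have hup : PySem.Set.update [] lista_var = PySem.Set.ofList lista_var := by
    rw [PySem.Set.ofList_eq_foldl]; rfl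
  have hg : lista_var.foldl (fun d tipo => d.insert tipo ([] : List String)) PySem.Dict.empty
      = mdict (PySem.Set.ofList lista_var) (fun u => canon key u []) := by
    have h0 : (PySem.Dict.empty : PySem.Dict String (List String))
        = mdict [] (fun _ => ([] : List String)) := rfl
    rw [h0, b_init [] lista_var [] List.nodup_nil, hup]
    apply mdict_congr
    intro u _
    rw [canon_nil]
  have hv : lista_var.foldl (fun d tipo => d.insert tipo (PySem.Set.empty : PySem.Set String)) PySem.Dict.empty
      = mdict (PySem.Set.ofList lista_var) (fun u => canon key u []) := hg
  rw [hg, hv]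
  exact congrArg (fun st : PySem.Dict String (List String) × PySem.Dict String (PySem.Set String) => st.1.items)
    (b_main key (PySem.Set.ofList lista_var) (PySem.Set.nodup_ofList lista_var) lista_heroes lista_heroes [] rfl)

-- ===== VERDICT (by name: the statement is the Claim_ definition above) =====
theorem obtener_heroes_por_tipo_spec : Claim_equal_obtener_heroes_por_tipo := by
  intro lista_heroes lista_var key _ _
  unfold Spec_obtener_heroes_por_tipo
  rw [A_eq, B_eq]
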